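-- pv_equiv track=rewrite | github.com/pubkraal/Advent-2022 | days/day07.py | part2
-- ===== SOURCE A (Python) =====
-- from collections import namedtuple
--
-- NODE = namedtuple("Node", ["name", "size", "type", "children"])
--
-- def part2(instructions):
--     root, remaining_instructions = build_tree("/", instructions[1:])
--     assert len(remaining_instructions) == 0
--
--     totsize = 70000000
--     req = 30000000
--     used = calc_size(root)
--     free = totsize - used
--     need = req - free
--     return min(
--         [calc_size(n) for n in find_all_nodes(root) if calc_size(n) > need]
--     )
--
-- def find_all_nodes(root):
--     nodes = [root]
--     for child in root.children:
--         if child.type == "dir":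
--             nodes += find_all_nodes(child)
--     return nodes
--
-- def build_tree(name, instructions):
--     current = NODE(name, 0, "dir", [])
--
--     # instructions I care about:
--     # \$ cd \.\.$   -> return
--     # \$ cd .*$     -> dive deeper
--     # \$ ls         -> list nodes
--
--     while len(instructions):
--         instruction = instructions.pop(0)
--         if instruction == "$ cd ..":
--             return current, instructions
--         elif instruction == "$ ls":
--             # do some reading of nodes here
--             # only append files
--             while len(instructions) > 0 and not instructions[0].startswith(
--                 "$"
--             ):
--                 nxt = instructions.pop(0)
--                 if not nxt.startswith("dir"):
--                     size, name = nxt.split(" ", 1)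
--                     current.children.append(
--                         NODE(name, int(size), "file", None)
--                     )
--         elif instruction[:4] == "$ cd":
--             newnode, rem = build_tree(instruction[5:], instructions)
--             current.children.append(newnode)
--             instructions = rem
--
--     return current, []
--
-- def calc_size(node):
--     size = 0
--     for child in node.children:
--         if child.type == "file":
--             size += child.size
--         else:
--             size += calc_size(child)
--     return size
-- ===== SOURCE B (Python) =====
-- def part2(instructions):
--     # Single linear pass with an explicit stack of directory sizes (no tree).
--     stack = [0]
--     sizes = []
--     in_ls = False
--     for line in instructions[1:]:
--         if line == "$ cd ..":
--             if len(stack) > 1: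
--                 s = stack.pop()
--                 sizes.append(s)
--                 stack[-1] += s
--             in_ls = False
--         elif line == "$ ls":
--             in_ls = True
--         elif line.startswith("$"):
--             in_ls = False
--             if line[:4] == "$ cd":
--                 stack.append(0)
--         elif in_ls and not line.startswith("dir"):
--             stack[-1] += int(line.split(" ", 1)[0])
--     while len(stack) > 1:
--         s = stack.pop()
--         sizes.append(s)
--         stack[-1] += s
--     used = stack[0]
--     sizes.append(used)
--     need = 30000000 - (70000000 - used)
--     return min(s for s in sizes if s > need)
-- ===== Notes on version B (the rewrite author's own statement) =====
-- stated objective: faster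
-- what changed: A builds an explicit directory tree by recursive descent and then recomputes calc_size from scratch for every directory node (and twice per node in the min comprehension); B makes one linear pass over the transcript with a stack of running directory sizes, emitting each directory's total exactly once, so no tree is built and no size is recomputed.
import Mathlib
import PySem

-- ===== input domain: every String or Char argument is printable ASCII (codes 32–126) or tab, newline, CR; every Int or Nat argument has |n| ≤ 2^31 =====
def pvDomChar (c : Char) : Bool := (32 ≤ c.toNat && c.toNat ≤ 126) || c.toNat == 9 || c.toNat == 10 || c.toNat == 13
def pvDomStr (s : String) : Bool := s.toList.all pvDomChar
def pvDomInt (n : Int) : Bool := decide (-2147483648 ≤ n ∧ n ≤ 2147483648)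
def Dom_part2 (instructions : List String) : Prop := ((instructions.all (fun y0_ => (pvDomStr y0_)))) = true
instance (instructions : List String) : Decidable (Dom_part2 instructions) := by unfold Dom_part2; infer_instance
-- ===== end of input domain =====

-- B replaces A's recursive tree construction plus a repeated calc_size per directory with one
-- linear pass maintaining a stack of running directory sizes (no tree is built).

-- ===== PORT A =====
-- The namedtuple NODE("name","size","type","children"): files carry a size, dirs carry children
-- (a mutual pair instead of a nested inductive).
mutual
  inductive PNode where
    | file : String → Int → PNode
    | dir : String → PNodeList → PNode
  deriving Repr, DecidableEq
  inductive PNodeList where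
    | nil : PNodeList
    | cons : PNode → PNodeList → PNodeList
  deriving Repr, DecidableEq
end

-- children.append(x)
def pnAppend1 (cs : PNodeList) (x : PNode) : PNodeList :=
  match cs with
  | .nil => .cons x .nil
  | .cons h t => .cons h (pnAppend1 t x)

-- calc_size(node): files add their size, dirs recurse
mutual
  def calcSize (n : PNode) : Int :=
    match n with
    | .file _ _ => 0          -- A never calls calc_size on a file node
    | .dir _ cs => calcSizeList cs
  def calcSizeList (cs : PNodeList) : Int :=
    match cs with
    | .nil => 0
    | .cons (.file _ s) t => s + calcSizeList t
    | .cons (.dir nm cs') t => calcSize (.dir nm cs') + calcSizeList t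
end

-- find_all_nodes(root): the node itself, then recursion into dir children
mutual
  def findAll (n : PNode) : List PNode :=
    match n with
    | .file nm s => [.file nm s]
    | .dir nm cs => .dir nm cs :: findAllList cs
  def findAllList (cs : PNodeList) : List PNode :=
    match cs with
    | .nil => []
    | .cons (.file _ _) t => findAllList t
    | .cons (.dir nm cs') t => findAll (.dir nm cs') ++ findAllList t
end

-- the inner 'while ... not startswith("$")' loop of build_tree after "$ ls":
-- none = the ValueError of 'size, name = nxt.split(" ", 1)' / int(size)
def readLs (cs : PNodeList) (instructions : List String) : Option (PNodeList × List String) :=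
  match instructions with
  | [] => some (cs, [])
  | nxt :: rest =>
    if PySem.Str.startswith nxt "$" then some (cs, nxt :: rest)
    else if PySem.Str.startswith nxt "dir" then readLs cs rest
    else
      match PySem.Str.splitMax? nxt " " 1 with
      | some [size, name] =>
        match PySem.Int.ofStr? size with
        | some v => readLs (pnAppend1 cs (.file name v)) rest
        | none => none
      | _ => none

-- build_tree's while loop; 'cs' is current.children; fuel only makes the mutual
-- consumption terminate (fuel > number of remaining instructions never runs out)
def btLoop (fuel : Nat) (name : String) (cs : PNodeList) (instructions : List String) :
    Option (PNode × List String) :=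
  match fuel with
  | 0 => none
  | fuel + 1 =>
    match instructions with
    | [] => some (.dir name cs, [])
    | instruction :: rest =>
      if instruction == "$ cd .." then some (.dir name cs, rest)
      else if instruction == "$ ls" then
        match readLs cs rest with
        | some (cs', rest') => btLoop fuel name cs' rest'
        | none => none
      else if PySem.Str.slice instruction (some 0) (some 4) == "$ cd" then
        match btLoop fuel (PySem.Str.slice instruction (some 5) none) .nil rest with
        | some (newnode, rem) => btLoop fuel name (pnAppend1 cs newnode) rem
        | none => none
      else btLoop fuel name cs rest

def part2 (instructions : List String) : Int :=
  let instrs := PySem.List.slice instructions (some 1) none   -- instructions[1:]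
  match btLoop (instrs.length + 1) "/" .nil instrs with
  | none => 0                                                  -- a raise inside build_tree (outside Pre_)
  | some (root, rem) =>
    if rem.length = 0 then                                     -- the assert
      let used := calcSize root
      let need := (30000000 : Int) - ((70000000 : Int) - used)
      match PySem.List.min?
          (((findAll root).filter (fun n => calcSize n > need)).map (fun n => calcSize n))
          (fun x => x) with
      | some m => m
      | none => 0                                              -- min([]) : unreachable, the root itself always qualifies
    else 0                                                     -- AssertionError (outside Pre_)

-- ===== PORT B =====
-- state: (stack of open-directory running sizes, top = head; emitted dir sizes; in_ls flag)
def stepB (st : List Int × List Int × Bool) (line : String) :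
    Option (List Int × List Int × Bool) :=
  let (stack, sizes, inls) := st
  if line == "$ cd .." then
    match stack with
    | s :: p :: t => some ((p + s) :: t, sizes ++ [s], false)
    | _ => some (stack, sizes, false)                          -- len(stack) == 1: nothing to pop
  else if line == "$ ls" then some (stack, sizes, true)
  else if PySem.Str.startswith line "$" then
    if PySem.Str.slice line (some 0) (some 4) == "$ cd" then some (0 :: stack, sizes, false)
    else some (stack, sizes, false)
  else if inls && !PySem.Str.startswith line "dir" then
    match PySem.Str.splitMax? line " " 1 with
    | some (a :: _) =>
      match PySem.Int.ofStr? a with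
      | some v =>
        match stack with
        | top :: t => some ((top + v) :: t, sizes, inls)
        | [] => none                                           -- unreachable, the stack is never empty
      | none => none                                           -- int() ValueError
    | _ => none                                                -- unreachable, split always returns ≥ 1 part
  else some st

def bLoop (st : List Int × List Int × Bool) (lines : List String) :
    Option (List Int × List Int × Bool) :=
  match lines with
  | [] => some st
  | l :: rest =>
    match stepB st l with
    | some st' => bLoop st' rest
    | none => none

-- the final 'while len(stack) > 1' unwinding
def unwindB (stack : List Int) (sizes : List Int) : Int × List Int :=
  match stack with
  | [] => (0, sizes)                                           -- unreachable, the stack is never empty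
  | [s] => (s, sizes)
  | s :: p :: t => unwindB ((p + s) :: t) (sizes ++ [s])
termination_by stack.length

def part2_alt (instructions : List String) : Int :=
  match bLoop ([0], [], false) (PySem.List.slice instructions (some 1) none) with
  | none => 0                                                  -- int() ValueError (outside Pre_)
  | some (stack, sizes, _) =>
    let r := unwindB stack sizes
    let used := r.1
    let sizes2 := r.2 ++ [used]
    let need := (30000000 : Int) - ((70000000 : Int) - used)
    match PySem.List.min? (sizes2.filter (fun s => s > need)) (fun x => x) with
    | some m => m
    | none => 0                                                -- unreachable: used > need always

-- ===== PRECONDITION & SPEC =====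
-- an ls-listing line is either a 'dir …' line or 'SIZE NAME' with an int-parsable SIZE
def validFile (l : String) : Bool :=
  PySem.Str.startswith l "dir" ||
  (match PySem.Str.splitMax? l " " 1 with
   | some [a, _] => (PySem.Int.ofStr? a).isSome
   | _ => false)

-- grammar of a well-formed transcript, scanned left to right: 'b' = inside an ls listing,
-- 'd' = current nesting depth; '$ cd ..' at depth 0 only as the very last line (A's assert)
def validScan (b : Bool) (d : Nat) (lines : List String) : Bool :=
  match lines with
  | [] => true
  | l :: rest =>
    if l == "$ cd .." then
      match d with
      | 0 => rest.isEmpty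
      | d + 1 => validScan false d rest
    else if l == "$ ls" then validScan true d rest
    else if PySem.Str.startswith l "$" then
      if PySem.Str.slice l (some 0) (some 4) == "$ cd" then validScan false (d + 1) rest
      else validScan false d rest
    else if b then validFile l && validScan b d rest
    else validScan b d rest

-- Pre_ excludes exactly the transcripts on which A raises: a malformed line inside an
-- 'ls' listing (ValueError), or a '$ cd ..' at top level that is not the final line
-- (AssertionError).
def Pre_part2 (instructions : List String) : Prop :=
  validScan false 0 (instructions.drop 1) = true
instance (instructions : List String) : Decidable (Pre_part2 instructions) := by
  unfold Pre_part2; infer_instance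

def pvWitness_part2 : List String :=
  ["$ cd /", "$ cd a", "$ ls", "100 f.txt", "dir b", "$ cd ..", "$ ls", "200 g"]

def Spec_part2 (instructions : List String) (out : Int) : Prop := out = part2_alt instructions
instance (instructions : List String) (out : Int) : Decidable (Spec_part2 instructions out) := by
  unfold Spec_part2; infer_instance

-- ===== CLAIM (what is proved, stated in full; the proofs are below) =====
def Claim_equal_part2 : Prop := ∀ (instructions : List String), Dom_part2 instructions → Pre_part2 instructions → Spec_part2 instructions (part2 instructions)

-- ===== LEMMAS AND PROOFS =====

-- list append on PNodeList
def appL (a b : PNodeList) : PNodeList :=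
  match a with
  | .nil => b
  | .cons h t => .cons h (appL t b)

-- sizes of all directories in a subtree, children first (postorder)
mutual
  def dsN (n : PNode) : List Int :=
    match n with
    | .file _ _ => []
    | .dir _ cs => dsL cs ++ [calcSizeList cs]
  def dsL (cs : PNodeList) : List Int :=
    match cs with
    | .nil => []
    | .cons h t => dsN h ++ dsL t
end

-- prefix sums emitted when unwinding a stack segment (head = deepest)
def emit1 (a : Int) (E : List Int) : List Int :=
  match E with
  | [] => [a]
  | b :: t => a :: emit1 (b + a) t

def ems (E : List Int) : List Int :=
  match E with
  | [] => []
  | a :: t => emit1 a t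

def headCmd (lines : List String) : Bool :=
  match lines with
  | [] => true
  | l :: _ => PySem.Str.startswith l "$"

theorem appL_nil (a : PNodeList) : appL a .nil = a := by
  cases a with
  | nil => rfl
  | cons h t => simp [appL, appL_nil t]

theorem appL_assoc (a b c : PNodeList) : appL (appL a b) c = appL a (appL b c) := by
  cases a with
  | nil => rfl
  | cons h t => simp [appL, appL_assoc t b c]

theorem pnAppend1_appL (cs : PNodeList) (x : PNode) (y : PNodeList) :
    appL (pnAppend1 cs x) y = appL cs (.cons x y) := by
  cases cs with
  | nil => rfl
  | cons h t => simp [pnAppend1, appL, pnAppend1_appL t x y]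

theorem szL_appL (a b : PNodeList) :
    calcSizeList (appL a b) = calcSizeList a + calcSizeList b := by
  cases a with
  | nil => simp [appL, calcSizeList]
  | cons h t =>
    cases h with
    | file nm s => simp [appL, calcSizeList, szL_appL t b]; ring
    | dir nm cs' => simp [appL, calcSizeList, szL_appL t b]; ring

theorem dsL_appL (a b : PNodeList) : dsL (appL a b) = dsL a ++ dsL b := by
  cases a with
  | nil => simp [appL, dsL]
  | cons h t => simp [appL, dsL, dsL_appL t b]

mutual
  theorem perm_findAll (nm : String) (cs : PNodeList) :
      ((findAll (.dir nm cs)).map calcSize).Perm (dsL cs ++ [calcSizeList cs]) := by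
    simp only [findAll, List.map_cons, calcSize]
    exact ((perm_findAllList cs).cons _).trans (List.perm_append_singleton _ _).symm
  theorem perm_findAllList (cs : PNodeList) :
      ((findAllList cs).map calcSize).Perm (dsL cs) := by
    cases cs with
    | nil => simp [findAllList, dsL]
    | cons h t =>
      cases h with
      | file nm sz => simpa [findAllList, dsL, dsN] using perm_findAllList t
      | dir nm cs' =>
        simp only [findAllList, dsL, dsN, List.map_append]
        exact (perm_findAll nm cs').append (perm_findAllList t)
end

theorem bLoop_append (st : List Int × List Int × Bool) (xs ys : List String) :
    bLoop st (xs ++ ys) = (bLoop st xs).bind (fun st' => bLoop st' ys) := by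
  induction xs generalizing st with
  | nil => simp [bLoop]
  | cons l rest ih =>
    simp only [List.cons_append, bLoop]
    cases stepB st l with
    | none => simp
    | some st' => simp [ih]

theorem em_spec (E : List Int) (a c : Int) (Z : List Int) :
    unwindB (a :: E ++ [c]) Z = (c + (a + E.sum), Z ++ emit1 a E) := by
  induction E generalizing a Z with
  | nil => simp [unwindB, emit1]
  | cons b t ih =>
    simp only [List.cons_append]
    rw [show unwindB (a :: b :: (t ++ [c])) Z = unwindB ((b + a) :: (t ++ [c])) (Z ++ [a]) by
        simp [unwindB]]
    have ih' := ih (b + a) (Z ++ [a])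
    rw [List.cons_append] at ih'
    rw [ih']
    simp only [Prod.ext_iff, List.sum_cons, List.append_assoc, List.singleton_append, emit1]
    refine ⟨by ring, by simp⟩

theorem unwindB_spec (E : List Int) (c : Int) (Z : List Int) :
    unwindB (E ++ [c]) Z = (c + E.sum, Z ++ ems E) := by
  cases E with
  | nil => simp [unwindB, ems]
  | cons a t => rw [show ((a :: t) ++ [c] : List Int) = a :: t ++ [c] from rfl, em_spec]; simp [ems]

theorem emit1_append_sing (a : Int) (E : List Int) (c : Int) :
    emit1 a (E ++ [c]) = emit1 a E ++ [c + (a + E.sum)] := by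
  induction E generalizing a with
  | nil => simp [emit1]
  | cons b t ih =>
    simp only [List.cons_append, emit1, ih, List.sum_cons]
    have h : c + (b + a + t.sum) = c + (a + (b + t.sum)) := by ring
    rw [h]

theorem ems_append_sing (E : List Int) (c : Int) :
    ems (E ++ [c]) = ems E ++ [E.sum + c] := by
  cases E with
  | nil => simp [ems, emit1]
  | cons a t =>
    simp only [List.cons_append, ems, emit1_append_sing, List.sum_cons]
    have h : c + (a + t.sum) = a + t.sum + c := by ring
    rw [h]

theorem min?_perm (xs ys : List Int) (h : xs.Perm ys) :
    PySem.List.min? xs (fun x => x) = PySem.List.min? ys (fun x => x) := by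
  rcases hmx : PySem.List.min? xs (fun x => x) with _ | m
  · rw [PySem.List.min?_eq_none_iff] at hmx
    subst hmx
    rw [(PySem.List.min?_eq_none_iff ys _).2 h.nil_eq.symm]
  · rcases hmy : PySem.List.min? ys (fun x => x) with _ | m'
    · rw [PySem.List.min?_eq_none_iff] at hmy
      subst hmy
      have hx := (PySem.List.min?_eq_none_iff xs (fun x => x)).2 h.eq_nil
      rw [hx] at hmx
      cases hmx
    · have h1 := PySem.List.min?_mem hmx
      have h2 := PySem.List.min?_mem hmy
      have h3 := PySem.List.min?_isMin hmx m' (h.mem_iff.2 h2)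
      have h4 := PySem.List.min?_isMin hmy m (h.mem_iff.1 h1)
      exact congrArg some (le_antisymm h3 h4)

theorem slice4_startswith (l : String)
    (h : (PySem.Str.slice l (some 0) (some 4) == ("$ cd" : String)) = true) :
    PySem.Str.startswith l "$" = true := by
  rw [beq_iff_eq] at h
  have h2 : (PySem.Str.slice l (some 0) (some 4)).toList = ("$ cd" : String).toList := by rw [h]
  simp [pysem] at h2
  -- h2 : l.toList.take 4 = ['$',' ','c','d']  (hopefully)
  rw [PySem.Str.startswith_eq, PySem.Chars.startswith_iff]
  refine ⟨' ' :: 'c' :: 'd' :: l.toList.drop 4, ?_⟩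
  conv_rhs => rw [← List.take_append_drop 4 l.toList]
  rw [h2]
  rfl

theorem not_dollar_facts (l : String) (h : PySem.Str.startswith l "$" = false) :
    (l == ("$ cd .." : String)) = false ∧ (l == ("$ ls" : String)) = false ∧
      (PySem.Str.slice l (some 0) (some 4) == ("$ cd" : String)) = false := by
  refine ⟨?_, ?_, ?_⟩
  · by_contra hb
    simp only [Bool.not_eq_false, beq_iff_eq] at hb
    subst hb
    exact absurd h (by decide)
  · by_contra hb
    simp only [Bool.not_eq_false, beq_iff_eq] at hb
    subst hb
    exact absurd h (by decide)
  · by_contra hb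
    simp only [Bool.not_eq_false] at hb
    rw [slice4_startswith l hb] at h
    cases h

-- the ls-listing segment: readLs succeeds, appends only files, and B adds the same sizes
theorem readLs_spec (rest : List String) (d : Nat) (hv : validScan true d rest = true) :
    ∃ (seg rest' : List String) (F : PNodeList),
      rest = seg ++ rest' ∧
      headCmd rest' = true ∧
      validScan true d rest' = true ∧
      dsL F = [] ∧
      (∀ cs, readLs cs rest = some (appL cs F, rest')) ∧
      (∀ t S Z, bLoop (t :: S, Z, true) seg = some ((t + calcSizeList F) :: S, Z, true)) := by
  induction rest with
  | nil =>
    exact ⟨[], [], .nil, rfl, rfl, rfl, rfl,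
      fun cs => by simp [readLs, appL_nil],
      fun t S Z => by simp [bLoop, calcSizeList]⟩
  | cons nxt r ih =>
    by_cases hd : PySem.Str.startswith nxt "$" = true
    · exact ⟨[], nxt :: r, .nil, rfl, hd, hv, rfl,
        fun cs => by rw [readLs, if_pos hd, appL_nil],
        fun t S Z => by simp [bLoop, calcSizeList]⟩
    · rw [Bool.not_eq_true] at hd
      obtain ⟨f1, f2, f3⟩ := not_dollar_facts nxt hd
      have hdc : PySem.Chars.startswith nxt.toList ['$'] = false := by simpa using hd
      simp only [validScan] at hv
      simp only [f1, f2, f3, hd, Bool.false_eq_true, if_false, if_true, Bool.and_eq_true] at hv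
      obtain ⟨hvf, hvr⟩ := hv
      obtain ⟨seg', rest', F, hseg, hhc, hvs, hds, hread, hbl⟩ := ih hvr
      by_cases hdir : PySem.Str.startswith nxt "dir" = true
      · have hdirc : PySem.Chars.startswith nxt.toList ['d', 'i', 'r'] = true := by simpa using hdir
        refine ⟨nxt :: seg', rest', F, by rw [hseg]; rfl, hhc, hvs, hds,
          fun cs => by simp only [readLs]; simp [hdc, hdirc, hread cs],
          fun t S Z => ?_⟩
        rw [bLoop, show stepB (t :: S, Z, true) nxt = some (t :: S, Z, true) by
          simp [stepB, f1, f2, hdc, hdirc]]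
        exact hbl t S Z
      · rw [Bool.not_eq_true] at hdir
        have hdirc : PySem.Chars.startswith nxt.toList ['d', 'i', 'r'] = false := by simpa using hdir
        simp only [validFile, hdir, Bool.false_or] at hvf
        split at hvf
        case h_2 => cases hvf
        case h_1 a nm hsp =>
          obtain ⟨v, hv'⟩ := Option.isSome_iff_exists.1 hvf
          refine ⟨nxt :: seg', rest', .cons (.file nm v) F, by rw [hseg]; rfl, hhc, hvs,
            by simp [dsL, dsN, hds],
            fun cs => ?_, fun t S Z => ?_⟩
          · simp only [readLs]
            simp only [hd, hdir, hsp, hv', Bool.false_eq_true, if_false]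
            rw [hread (pnAppend1 cs (.file nm v)), pnAppend1_appL]
          · rw [bLoop, show stepB (t :: S, Z, true) nxt = some ((t + v) :: S, Z, true) by
              simp [stepB, f1, f2, hdc, hdirc, hsp, hv']]
            show bLoop ((t + v) :: S, Z, true) seg' = _
            rw [hbl (t + v) S Z]
            have he : t + v + calcSizeList F = t + calcSizeList (.cons (.file nm v) F) := by
              simp [calcSizeList]; ring
            rw [he]

-- Main simulation: on a well-formed suffix, build_tree succeeds and B's stack machine
-- tracks exactly the sizes A computes.  SimOut describes B's run over the segment A consumes:
-- either A stopped at an unmatched "$ cd .." (left) or consumed everything (right).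
def SimOut (instrs : List String) (t : Int) (S Z : List Int) (b₀ : Bool)
    (sz : Int) (D : List Int) (rem : List String) : Prop :=
  (∃ hs, instrs = hs ++ "$ cd .." :: rem ∧
      ((S = [] ∧ rem = [] ∧ ∃ zs, List.Perm zs D ∧
          bLoop (t :: S, Z, b₀) instrs = some ([t + sz], Z ++ zs, false))
       ∨ (∃ p S', S = p :: S' ∧ validScan false S'.length rem = true ∧
           rem.length < instrs.length ∧
           ∃ zs, List.Perm zs D ∧
             bLoop (t :: S, Z, b₀) instrs =
               bLoop ((p + (t + sz)) :: S', Z ++ zs ++ [t + sz], false) rem)))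
  ∨ (rem = [] ∧ ∃ E zs b',
       List.Perm (zs ++ ems E) D ∧
       bLoop (t :: S, Z, b₀) instrs = some (E ++ (t + (sz - E.sum)) :: S, Z ++ zs, b'))

theorem simOut_congr (instrs : List String) (t : Int) (S Z : List Int) (b₀ : Bool)
    {sz sz' : Int} {D D' : List Int} (rem : List String)
    (h : SimOut instrs t S Z b₀ sz D rem)
    (hsz : sz = sz') (hD : D = D') : SimOut instrs t S Z b₀ sz' D' rem := by
  rw [← hsz, ← hD]; exact h

theorem simOut_lift (pre rem₀ : List String) (instrs : List String)
    (hpre : instrs = pre ++ rem₀)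
    (t s₀ : Int) (S Z : List Int) (b₀ b₁ : Bool) (W D₀ : List Int) (hW : W.Perm D₀)
    (hB : bLoop (t :: S, Z, b₀) instrs = bLoop ((t + s₀) :: S, Z ++ W, b₁) rem₀)
    (sz : Int) (D : List Int) (rem : List String)
    (h : SimOut rem₀ (t + s₀) S (Z ++ W) b₁ sz D rem) :
    SimOut instrs t S Z b₀ (s₀ + sz) (D₀ ++ D) rem := by
  rcases h with ⟨hs, hdec, hcase⟩ | ⟨hrem, E, zs, b', hperm, hBe⟩
  · left
    refine ⟨pre ++ hs, by rw [hpre, hdec]; simp, ?_⟩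
    rcases hcase with ⟨hS, hrem, zs, hperm, hBc⟩ | ⟨p, S', hS, hvr, hlr, zs, hperm, hBc⟩
    · refine Or.inl ⟨hS, hrem, W ++ zs, hW.append hperm, ?_⟩
      rw [hB, hBc]
      have harith : t + s₀ + sz = t + (s₀ + sz) := by ring
      rw [harith, List.append_assoc]
    · refine Or.inr ⟨p, S', hS, hvr, ?_, W ++ zs, hW.append hperm, ?_⟩
      · have : instrs.length = pre.length + rem₀.length := by rw [hpre]; simp
        omega
      · rw [hB, hBc]
        have h1 : p + (t + s₀ + sz) = p + (t + (s₀ + sz)) := by ring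
        have h2 : t + s₀ + sz = t + (s₀ + sz) := by ring
        rw [h1, h2]
        simp [List.append_assoc]
  · right
    refine ⟨hrem, E, W ++ zs, b', ?_, ?_⟩
    · rw [List.append_assoc]; exact hW.append hperm
    · rw [hB, hBe]
      have h1 : t + s₀ + (sz - E.sum) = t + (s₀ + sz - E.sum) := by ring
      rw [h1, List.append_assoc]

theorem sim (fuel : Nat) :
    ∀ (instrs : List String), instrs.length < fuel →
    ∀ (b₀ : Bool) (name : String) (cs : PNodeList) (t : Int) (S Z : List Int),
    (b₀ = true → headCmd instrs = true) →
    validScan b₀ S.length instrs = true →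
    ∃ (Δ : PNodeList) (rem : List String),
      btLoop fuel name cs instrs = some (.dir name (appL cs Δ), rem) ∧
      SimOut instrs t S Z b₀ (calcSizeList Δ) (dsL Δ) rem := by
  induction fuel with
  | zero => intro instrs h; omega
  | succ f ihf =>
    intro instrs hlen b₀ name cs t S Z hb hv
    cases instrs with
    | nil =>
      refine ⟨.nil, [], by simp [btLoop, appL_nil], Or.inr ⟨rfl, [], [], b₀, by simp [ems, dsL],
        by simp [bLoop, calcSizeList]⟩⟩
    | cons instruction rest =>
      have hlen' : rest.length < f := by simpa using hlen
      by_cases h1 : (instruction == ("$ cd .." : String)) = true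
      · -- "$ cd ..": A returns to the parent, B pops the stack
        have heq : instruction = "$ cd .." := by simpa using h1
        simp only [validScan, h1, if_true] at hv
        cases S with
        | nil =>
          have hr : rest = [] := by simpa [List.isEmpty_iff] using hv
          subst hr
          refine ⟨.nil, [], by simp [btLoop, h1, appL_nil],
            Or.inl ⟨[], by simp [heq], Or.inl ⟨rfl, rfl, [], by simp [dsL], ?_⟩⟩⟩
          simp [bLoop, stepB, h1, calcSizeList]
        | cons p S' =>
          refine ⟨.nil, rest, by simp [btLoop, h1, appL_nil],
            Or.inl ⟨[], by simp [heq], Or.inr ⟨p, S', rfl, hv, by simp, [], by simp [dsL], ?_⟩⟩⟩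
          simp [bLoop, stepB, h1, calcSizeList]
      · by_cases h2 : (instruction == ("$ ls" : String)) = true
        · -- "$ ls": both consume the listing, A as files, B as size additions
          simp only [validScan, h1, h2, Bool.false_eq_true, if_false, if_true] at hv
          obtain ⟨seg, rest', F, hseg, hhc, hvs, hds, hread, hbl⟩ := readLs_spec rest S.length hv
          have hlen'' : rest'.length < f := by
            have : rest.length = seg.length + rest'.length := by rw [hseg]; simp
            omega
          obtain ⟨Δ', rem, hbt, hout⟩ :=
            ihf rest' hlen'' true name (appL cs F) (t + calcSizeList F) S Z (fun _ => hhc) hvs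
          refine ⟨appL F Δ', rem, ?_, ?_⟩
          · rw [show btLoop (f + 1) name cs (instruction :: rest)
                  = btLoop f name (appL cs F) rest' by
                simp only [btLoop, h1, h2, Bool.false_eq_true, if_false, if_true, hread cs]]
            rw [hbt, appL_assoc]
          · have hBpre : bLoop (t :: S, Z, b₀) (instruction :: rest)
                = bLoop ((t + calcSizeList F) :: S, Z ++ [], true) rest' := by
              rw [bLoop, show stepB (t :: S, Z, b₀) instruction = some (t :: S, Z, true) by
                simp [stepB, h1, h2]]
              show bLoop (t :: S, Z, true) rest = _
              rw [hseg, bLoop_append, hbl t S Z]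
              simp
            exact simOut_congr _ _ _ _ _ _
              (simOut_lift (instruction :: seg) rest' (instruction :: rest)
                (by rw [hseg]; simp) t (calcSizeList F)
                S Z b₀ true [] [] (List.Perm.refl _) hBpre _ _ rem (by simpa using hout))
              (by rw [szL_appL]) (by simp [dsL_appL, hds])
        · by_cases h3 : (PySem.Str.slice instruction (some 0) (some 4) == ("$ cd" : String)) = true
          · -- "$ cd <name>": A recurses, B pushes a fresh counter
            have hsw : PySem.Str.startswith instruction "$" = true := slice4_startswith _ h3
            have hswc : PySem.Chars.startswith instruction.toList ['$'] = true := by simpa using hsw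
            simp only [validScan, h1, h2, h3, hsw, Bool.false_eq_true, if_false, if_true] at hv
            obtain ⟨Δc, remc, hbtc, houtc⟩ :=
              ihf rest hlen' false (PySem.Str.slice instruction (some 5) none) .nil 0 (t :: S) Z
                (fun h => by cases h) (by simpa using hv)
            have hA1 : btLoop (f + 1) name cs (instruction :: rest)
                = btLoop f name (pnAppend1 cs (.dir (PySem.Str.slice instruction (some 5) none)
                    (appL .nil Δc))) remc := by
              simp only [btLoop, h1, h2, h3, Bool.false_eq_true, if_false, if_true, hbtc]
            have hBpre : bLoop (t :: S, Z, b₀) (instruction :: rest)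
                = bLoop (0 :: t :: S, Z, false) rest := by
              rw [bLoop, show stepB (t :: S, Z, b₀) instruction = some (0 :: t :: S, Z, false) by
                simp [stepB, h1, h2, h3, hswc]]
            rcases houtc with ⟨hs', hdecc, hcc⟩ | ⟨hremc, E, zs, b', hperm, hBe⟩
            · rcases hcc with ⟨hSc, _, _⟩ | ⟨p, S'', hSc, hvrem, hlrem, zs, hperm, hBc⟩
              · cases hSc
              · injection hSc with hpt hSS
                subst hpt
                subst hSS
                have hlenr : remc.length < f := by
                  have : remc.length < rest.length := hlrem
                  omega
                rw [List.append_assoc] at hBc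
                obtain ⟨Δ'', rem'', hbt2, hout2⟩ :=
                  ihf remc hlenr false name
                    (pnAppend1 cs (.dir (PySem.Str.slice instruction (some 5) none) (appL .nil Δc)))
                    (t + (0 + calcSizeList Δc)) S (Z ++ (zs ++ [0 + calcSizeList Δc]))
                    (fun h => by cases h) hvrem
                refine ⟨.cons (.dir (PySem.Str.slice instruction (some 5) none) (appL .nil Δc)) Δ'',
                  rem'', ?_, ?_⟩
                · rw [hA1, hbt2, pnAppend1_appL]
                · refine simOut_congr _ _ _ _ _ _
                    (simOut_lift (instruction :: (hs' ++ ["$ cd .."])) remc (instruction :: rest)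
                      (by rw [hdecc]; simp) t (0 + calcSizeList Δc) S Z b₀ false
                      (zs ++ [0 + calcSizeList Δc]) (dsL Δc ++ [calcSizeList Δc])
                      (by simpa using hperm.append (List.Perm.refl [calcSizeList Δc]))
                      (hBpre.trans hBc) _ _ rem'' hout2) ?_ ?_
                  · simp [calcSizeList, calcSize, appL]
                  · simp [dsL, dsN, appL]
            · -- the child consumed everything: A unwinds through empty lists, B at the end
              subst hremc
              obtain ⟨f', rfl⟩ : ∃ f', f = f' + 1 := ⟨f - 1, by omega⟩
              refine ⟨.cons (.dir (PySem.Str.slice instruction (some 5) none) (appL .nil Δc)) .nil,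
                [], ?_, ?_⟩
              · rw [hA1]
                simp only [btLoop]
                rw [show appL cs (.cons (.dir (PySem.Str.slice instruction (some 5) none)
                      (appL .nil Δc)) .nil)
                    = pnAppend1 cs (.dir (PySem.Str.slice instruction (some 5) none) (appL .nil Δc))
                  from by rw [← pnAppend1_appL, appL_nil]]
              · refine Or.inr ⟨rfl, E ++ [0 + (calcSizeList Δc - E.sum)], zs, b', ?_, ?_⟩
                · rw [ems_append_sing]
                  have harith : E.sum + (0 + (calcSizeList Δc - E.sum)) = calcSizeList Δc := by ring
                  rw [harith, ← List.append_assoc]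
                  simpa [dsL, dsN, appL] using hperm.append (List.Perm.refl [calcSizeList Δc])
                · rw [hBpre, hBe]
                  have harith : t + (calcSizeList (.cons (.dir
                        (PySem.Str.slice instruction (some 5) none) (appL .nil Δc)) .nil)
                      - (E ++ [0 + (calcSizeList Δc - E.sum)]).sum) = t := by
                    simp [calcSizeList, calcSize, appL, List.sum_append]
                  rw [harith, ← List.append_cons]
          · by_cases hsw : PySem.Str.startswith instruction "$" = true
            · -- an unrecognised "$ …" line: both sides skip it
              have hswc : PySem.Chars.startswith instruction.toList ['$'] = true := by simpa using hsw
              simp only [validScan, h1, h2, h3, hsw, Bool.false_eq_true, if_false, if_true] at hv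
              obtain ⟨Δ', rem, hbt, hout⟩ :=
                ihf rest hlen' false name cs t S Z (fun h => by cases h) hv
              refine ⟨Δ', rem, ?_, ?_⟩
              · rw [show btLoop (f + 1) name cs (instruction :: rest) = btLoop f name cs rest by
                  simp only [btLoop, h1, h2, h3, Bool.false_eq_true, if_false]]
                exact hbt
              · refine simOut_congr _ _ _ _ _ _
                  (simOut_lift [instruction] rest (instruction :: rest) rfl t 0 S Z b₀ false [] []
                    (List.Perm.refl _) (by simp [bLoop, stepB, h1, h2, h3, hswc]) _ _ rem
                    (by rw [add_zero, List.append_nil]; exact hout)) (zero_add _) (by simp)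
            · -- a plain line outside any listing: both sides ignore it
              have hb0 : b₀ = false := by
                cases hbe : b₀
                · rfl
                · exact absurd (hb hbe) (by simp only [headCmd]; exact hsw)
              subst hb0
              rw [Bool.not_eq_true] at hsw
              have hswc : PySem.Chars.startswith instruction.toList ['$'] = false := by simpa using hsw
              simp only [validScan, h1, h2, hsw, Bool.false_eq_true, if_false] at hv
              obtain ⟨Δ', rem, hbt, hout⟩ :=
                ihf rest hlen' false name cs t S Z (fun h => by cases h) hv
              refine ⟨Δ', rem, ?_, ?_⟩
              · rw [show btLoop (f + 1) name cs (instruction :: rest) = btLoop f name cs rest by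
                  simp only [btLoop, h1, h2, h3, Bool.false_eq_true, if_false]]
                exact hbt
              · refine simOut_congr _ _ _ _ _ _
                  (simOut_lift [instruction] rest (instruction :: rest) rfl t 0 S Z false false [] []
                    (List.Perm.refl _) (by simp [bLoop, stepB, h1, h2, hswc]) _ _ rem
                    (by rw [add_zero, List.append_nil]; exact hout)) (zero_add _) (by simp)

-- [calc_size(n) for n in … if calc_size(n) > need] builds filter-then-map = filter on the mapped list
theorem filter_map_swap (l : List PNode) (need : Int) :
    (l.filter (fun n => decide (calcSize n > need))).map (fun n => calcSize n)
      = (l.map calcSize).filter (fun s => decide (s > need)) := by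
  induction l with
  | nil => rfl
  | cons h t ih => by_cases hp : calcSize h > need <;> simp [hp, ih]

-- the common tail of part2 / part2_alt: min over permuted size lists agrees
theorem min_match_perm (l : List PNode) (ys : List Int) (need : Int)
    (h : (l.map calcSize).Perm ys) :
    (match PySem.List.min?
        ((l.filter (fun n => decide (calcSize n > need))).map (fun n => calcSize n))
        (fun x => x) with
     | some m => m | none => (0 : Int))
    = (match PySem.List.min? (ys.filter (fun s => decide (s > need))) (fun x => x) with
       | some m => m | none => (0 : Int)) := by
  rw [filter_map_swap, min?_perm _ _ (h.filter _)]

-- ===== VERDICT (by name: the statement is the Claim_ definition above) =====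
theorem part2_spec : Claim_equal_part2 := by
  unfold Claim_equal_part2
  intro instructions _ hpre
  unfold Spec_part2
  have hsl : PySem.List.slice instructions (some 1) none = instructions.drop 1 := by
    rw [PySem.List.slice_from] <;> norm_num
  unfold Pre_part2 at hpre
  obtain ⟨Δ, rem, hbt, hout⟩ :=
    sim ((instructions.drop 1).length + 1) (instructions.drop 1) (by omega) false "/" .nil
      0 [] [] (fun h => by cases h) (by simpa using hpre)
  rcases hout with ⟨hs, hdec, hcase⟩ | ⟨hrem, E, zs, b', hperm, hBe⟩
  · rcases hcase with ⟨_, hrem, zs, hperm, hB⟩ | ⟨p, S', hS, _⟩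
    · subst hrem
      simp only [part2, part2_alt, hsl, hbt, hB]
      simp only [List.length_nil, List.nil_append]
      simp only [show unwindB [0 + calcSizeList Δ] zs = (0 + calcSizeList Δ, zs) from by
        simp [unwindB]]
      simp only [calcSize, appL, zero_add]
      simp only [if_true]
      exact min_match_perm _ _ _ ((perm_findAll "/" Δ).trans
        (hperm.append (List.Perm.refl [calcSizeList Δ])).symm)
    · cases hS
  · subst hrem
    simp only [part2, part2_alt, hsl, hbt, hBe]
    simp only [List.length_nil, List.nil_append]
    simp only [unwindB_spec]
    have hused : 0 + (calcSizeList Δ - E.sum) + E.sum = calcSizeList Δ := by ring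
    simp only [hused]
    simp only [calcSize, appL]
    simp only [if_true]
    exact min_match_perm _ _ _ ((perm_findAll "/" Δ).trans
      (hperm.append (List.Perm.refl [calcSizeList Δ])).symm)
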